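-- pv_equiv track=rewrite | github.com/Blakthorne/whispersermons | src/python/bible_quote_processor.py | build_composite_verse_text
-- ===== SOURCE A (Python) =====
-- from typing import List, Tuple, Dict, Optional, NamedTuple, Callable, TYPE_CHECKING
--
-- def build_composite_verse_text(individual_verses: Dict[int, str],
--                                 first_verse: Optional[int], last_verse: Optional[int]) -> str:
--     """
--     Build composite text from a subset of verses.
--
--     Args:
--         individual_verses: Dict mapping verse number to verse text
--         first_verse: First verse to include (None returns empty string)
--         last_verse: Last verse to include (None returns empty string)
--
--     Returns:
--         Combined verse text
--     """
--     if first_verse is None or last_verse is None: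
--         return ''
--
--     texts = []
--     for verse_num in range(first_verse, last_verse + 1):
--         if verse_num in individual_verses:
--             texts.append(individual_verses[verse_num])
--
--     return ' '.join(texts)
-- ===== SOURCE B (Python) =====
-- def build_composite_verse_text(individual_verses, first_verse, last_verse):
--     if first_verse is None or last_verse is None:
--         return ''
--     return ' '.join(individual_verses[v] for v in sorted(individual_verses)
--                     if first_verse <= v <= last_verse)
-- ===== Notes on version B (the rewrite author's own statement) =====
-- stated objective: simpler
-- what changed: Instead of scanning every integer in range(first_verse, last_verse+1) and testing dict membership, B iterates the dict's own keys sorted ascending, keeps those inside [first_verse, last_verse], and joins their texts in one expression.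
import Mathlib
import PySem

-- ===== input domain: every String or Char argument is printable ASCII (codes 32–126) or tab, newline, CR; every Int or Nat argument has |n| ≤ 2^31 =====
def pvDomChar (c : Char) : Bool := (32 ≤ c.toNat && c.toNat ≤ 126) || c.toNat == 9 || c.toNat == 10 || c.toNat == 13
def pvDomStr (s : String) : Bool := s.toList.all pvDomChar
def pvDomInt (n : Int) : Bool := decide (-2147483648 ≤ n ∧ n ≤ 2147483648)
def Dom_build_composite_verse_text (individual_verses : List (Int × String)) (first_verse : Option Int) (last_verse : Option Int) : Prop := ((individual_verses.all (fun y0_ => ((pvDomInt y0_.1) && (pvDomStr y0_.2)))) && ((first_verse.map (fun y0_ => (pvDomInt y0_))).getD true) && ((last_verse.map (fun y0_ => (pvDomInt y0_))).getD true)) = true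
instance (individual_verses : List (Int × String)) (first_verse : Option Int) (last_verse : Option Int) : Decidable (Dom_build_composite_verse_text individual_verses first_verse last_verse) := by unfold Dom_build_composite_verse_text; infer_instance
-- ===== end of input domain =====

-- B replaces A's scan of the whole integer span (membership-tested per number) by a single
-- expression over the dict's own keys sorted ascending — simpler and independent of the span size.

-- ===== PORT A =====
-- A: guard on None; loop verse_num over range(first_verse, last_verse+1); if present, append its text; join.
def build_composite_verse_text (individual_verses : List (Int × String)) (first_verse : Option Int) (last_verse : Option Int) : String :=
  match first_verse, last_verse with
  | none, _ => ""
  | _, none => ""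
  | some f, some l =>
    let d : PySem.Dict Int String := PySem.Dict.ofList individual_verses
    let texts : List String :=
      (PySem.List.pyRange f (l + 1) 1).foldl
        (fun acc verse_num =>
          if d.contains verse_num then acc ++ [d.getD verse_num ""] else acc) []
    PySem.Str.join " " texts

-- ===== PORT B =====
-- B: guard on None; join the texts of the sorted dict keys that lie in [first_verse, last_verse].
def build_composite_verse_text_alt (individual_verses : List (Int × String)) (first_verse : Option Int) (last_verse : Option Int) : String :=
  match first_verse, last_verse with
  | none, _ => ""
  | _, none => ""
  | some f, some l =>
    let d : PySem.Dict Int String := PySem.Dict.ofList individual_verses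
    PySem.Str.join " "
      (((PySem.List.sorted d.keys (fun x => x) false).filter
          (fun v => decide (f ≤ v) && decide (v ≤ l))).map (fun v => d.getD v ""))

-- ===== PRECONDITION & SPEC =====
def Spec_build_composite_verse_text (individual_verses : List (Int × String)) (first_verse : Option Int) (last_verse : Option Int) (out : String) : Prop := out = build_composite_verse_text_alt individual_verses first_verse last_verse
instance (individual_verses : List (Int × String)) (first_verse : Option Int) (last_verse : Option Int) (out : String) : Decidable (Spec_build_composite_verse_text individual_verses first_verse last_verse out) := by unfold Spec_build_composite_verse_text; infer_instance

-- ===== CLAIM (what is proved, stated in full; the proofs are below) =====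
def Claim_equal_build_composite_verse_text : Prop := ∀ (individual_verses : List (Int × String)) (first_verse : Option Int) (last_verse : Option Int), Dom_build_composite_verse_text individual_verses first_verse last_verse → Spec_build_composite_verse_text individual_verses first_verse last_verse (build_composite_verse_text individual_verses first_verse last_verse)

-- ===== LEMMAS AND PROOFS =====

-- The two filtered key lists coincide: both are strictly increasing with the same membership.
theorem pv_filter_eq (d : PySem.Dict Int String) (hnd : d.keys.Nodup) (f l : Int) :
    (PySem.List.pyRange f (l + 1) 1).filter (fun v => d.contains v)
      = (PySem.List.sorted d.keys (fun x => x) false).filter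
          (fun v => decide (f ≤ v) && decide (v ≤ l)) := by
  have hsortperm := PySem.List.sorted_perm d.keys (fun x => x) false
  have hnds : (PySem.List.sorted d.keys (fun x => x) false).Nodup :=
    (hsortperm.nodup_iff).mpr hnd
  have hlt : (PySem.List.sorted d.keys (fun x => x) false).Pairwise (· < ·) := by
    have hle := PySem.List.sorted_pairwise d.keys (fun x => x)
    exact (hle.and hnds).imp (fun h => lt_of_le_of_ne h.1 h.2)
  have hs1 : ((PySem.List.pyRange f (l + 1) 1).filter (fun v => d.contains v)).Pairwise (· < ·) :=
    (PySem.List.pairwise_lt_pyRange_one f (l + 1)).filter _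
  have hs2 : ((PySem.List.sorted d.keys (fun x => x) false).filter
      (fun v => decide (f ≤ v) && decide (v ≤ l))).Pairwise (· < ·) := hlt.filter _
  have hperm : ((PySem.List.pyRange f (l + 1) 1).filter (fun v => d.contains v)).Perm
      ((PySem.List.sorted d.keys (fun x => x) false).filter
        (fun v => decide (f ≤ v) && decide (v ≤ l))) := by
    refine (List.perm_ext_iff_of_nodup (hs1.imp ne_of_lt) (hs2.imp ne_of_lt)).mpr ?_
    intro v
    simp only [List.mem_filter, PySem.List.mem_pyRange_one, PySem.List.mem_sorted,
      Bool.and_eq_true, decide_eq_true_eq]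
    constructor
    · rintro ⟨⟨h1, h2⟩, hc⟩
      exact ⟨(PySem.Dict.contains_iff_mem_keys d v).mp hc, h1, by omega⟩
    · rintro ⟨hk, h1, h2⟩
      exact ⟨⟨h1, by omega⟩, (PySem.Dict.contains_iff_mem_keys d v).mpr hk⟩
  exact hperm.eq_of_pairwise (fun a b _ _ h1 h2 => absurd h2 (not_lt.mpr h1.le)) hs1 hs2

-- ===== VERDICT (by name: the statement is the Claim_ definition above) =====
theorem build_composite_verse_text_spec : Claim_equal_build_composite_verse_text := by
  intro individual_verses first_verse last_verse _
  unfold Spec_build_composite_verse_text build_composite_verse_text build_composite_verse_text_alt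
  match first_verse, last_verse with
  | none, _ => rfl
  | some _, none => rfl
  | some f, some l =>
    simp only []
    rw [PySem.List.foldl_append_if (fun v => (PySem.Dict.ofList individual_verses).contains v)
          (fun v => (PySem.Dict.ofList individual_verses).getD v "")]
    rw [pv_filter_eq _ (PySem.Dict.nodup_keys_ofList individual_verses) f l]
    simp
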